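-- pv_equiv track=rewrite | github.com/bondmcsteve/SQA7018 | Homework 6/generator_video.py | generate_evens_without_yield
-- ===== SOURCE A (Python) =====
-- def generate_evens_without_yield(limit):
--     evens = []
--     num = 0
--     while num <= limit:
--         if num % 2 == 0:
--             evens.append(num)
--         num += 1
--     return evens
-- ===== SOURCE B (Python) =====
-- def generate_evens_without_yield(limit):
--     return list(range(0, limit + 1, 2))
-- ===== Notes on version B (the rewrite author's own statement) =====
-- stated objective: idiomatic
-- what changed: Replaces the scan over every integer up to the limit with a per-element modulo test by directly generating the evens with a range stepped by two.
import Mathlib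
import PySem

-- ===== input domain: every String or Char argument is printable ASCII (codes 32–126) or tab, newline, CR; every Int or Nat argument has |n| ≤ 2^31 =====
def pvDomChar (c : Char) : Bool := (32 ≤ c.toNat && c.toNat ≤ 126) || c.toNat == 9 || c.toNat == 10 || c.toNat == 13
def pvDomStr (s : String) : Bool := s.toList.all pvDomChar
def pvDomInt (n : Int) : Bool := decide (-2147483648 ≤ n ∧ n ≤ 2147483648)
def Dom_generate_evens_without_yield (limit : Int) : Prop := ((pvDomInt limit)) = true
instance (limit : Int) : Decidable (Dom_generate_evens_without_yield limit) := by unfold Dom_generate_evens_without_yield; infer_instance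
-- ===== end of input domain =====

-- B replaces A's scan of every integer 0..limit with a modulo test by direct generation of the evens (range stepped by 2); idiomatic.


-- ===== PORT A =====
-- while num <= limit: if num % 2 == 0: evens.append(num); num += 1
def pvLoopA (limit num : Int) (evens : List Int) : List Int :=
  if num ≤ limit then
    pvLoopA limit (num + 1) (if PySem.Int.mod num 2 = 0 then evens ++ [num] else evens)
  else evens
termination_by (limit + 1 - num).toNat
decreasing_by omega

def generate_evens_without_yield (limit : Int) : List Int :=
  pvLoopA limit 0 []

-- ===== PORT B =====
def generate_evens_without_yield_alt (limit : Int) : List Int :=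
  PySem.List.pyRange 0 (limit + 1) 2

-- ===== PRECONDITION & SPEC =====
def Spec_generate_evens_without_yield (limit : Int) (out : List Int) : Prop := out = generate_evens_without_yield_alt limit
instance (limit : Int) (out : List Int) : Decidable (Spec_generate_evens_without_yield limit out) := by unfold Spec_generate_evens_without_yield; infer_instance

-- ===== CLAIM (what is proved, stated in full; the proofs are below) =====
def Claim_equal_generate_evens_without_yield : Prop := ∀ (limit : Int), Dom_generate_evens_without_yield limit → Spec_generate_evens_without_yield limit (generate_evens_without_yield limit)

-- ===== LEMMAS AND PROOFS =====

theorem pyRange_two_empty (a b : Int) (h : b ≤ a) : PySem.List.pyRange a b 2 = [] := by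
  rw [PySem.List.pyRange_of_pos _ _ (by omega)]
  simp [show ¬ a < b by omega]

theorem pyRange_two_cons (a b : Int) (h : a < b) : PySem.List.pyRange a b 2 = a :: PySem.List.pyRange (a + 2) b 2 := by
  rw [PySem.List.pyRange_of_pos _ _ (by omega), PySem.List.pyRange_of_pos _ _ (by omega)]
  have hc : (if a < b then ((b - a + 2 - 1) / 2).toNat else 0)
      = (if a + 2 < b then ((b - (a + 2) + 2 - 1) / 2).toNat else 0) + 1 := by
    split_ifs <;> omega
  rw [hc, List.range_succ_eq_map, List.map_cons, List.map_map]
  refine congrArg₂ _ (by omega) ?_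
  apply List.map_congr_left
  intro k _
  simp only [Function.comp_apply]
  push_cast
  ring

theorem pvLoopA_eq (n : Nat) : ∀ (limit num : Int) (acc : List Int),
    (limit + 1 - num).toNat ≤ n → 0 ≤ num → PySem.Int.mod num 2 = 0 →
    pvLoopA limit num acc = acc ++ PySem.List.pyRange num (limit + 1) 2 := by
  induction n with
  | zero =>
    intro limit num acc hf _ _
    rw [pvLoopA, if_neg (by omega), pyRange_two_empty _ _ (by omega), List.append_nil]
  | succ n ih =>
    intro limit num acc hf hnum hmod
    by_cases h1 : num ≤ limit
    · have hm0 : num % 2 = 0 := by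
        rw [← PySem.Int.mod_eq_emod_of_pos (by omega : (0:Int) < 2)]; exact hmod
      rw [pvLoopA, if_pos h1, if_pos hmod, pyRange_two_cons _ _ (by omega)]
      by_cases h2 : num + 1 ≤ limit
      · rw [pvLoopA, if_pos h2,
          if_neg (by rw [PySem.Int.mod_eq_emod_of_pos (by omega : (0:Int) < 2)]; omega)]
        rw [ih limit (num + 1 + 1) (acc ++ [num]) (by omega) (by omega)
          (by rw [PySem.Int.mod_eq_emod_of_pos (by omega : (0:Int) < 2)]; omega)]
        simp [show num + 1 + 1 = num + 2 by ring]
      · rw [pvLoopA, if_neg (by omega), pyRange_two_empty _ _ (by omega)]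
    · rw [pvLoopA, if_neg h1, pyRange_two_empty _ _ (by omega), List.append_nil]

-- ===== VERDICT (by name: the statement is the Claim_ definition above) =====
theorem generate_evens_without_yield_spec : Claim_equal_generate_evens_without_yield := by
  intro limit _
  unfold Spec_generate_evens_without_yield generate_evens_without_yield generate_evens_without_yield_alt
  exact pvLoopA_eq (limit + 1).toNat limit 0 [] (by omega) le_rfl (by decide)
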